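-- pv_equiv track=rewrite | github.com/pyth0g/Python | Python/Edabit Challenges/split_into_buckets.py | split_into_buckets
-- ===== SOURCE A (Python) =====
-- def split_into_buckets(phrase, n):
--     result = [""]
--     final = []
--     phrases = phrase.replace(" ","|").split("|")
--     c = 0
--     for i in phrases:
--         if len(i) > n:
--             return []
--     for phrase in phrases:
--         if len(phrase) + len(result[c]) <= n:
--             result[c] += phrase + " "
--         else:
--             c += 1
--             result.append(phrase + " ")
--     for i in result:
--         if i:
--             if i[-1] == " ":
--                 final.append(i[:-1])
--             else:
--                 final.append(i)
--     return final
-- ===== SOURCE B (Python) =====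
-- def split_into_buckets(phrase, n):
--     words = phrase.replace(" ", "|").split("|")
--     if any(len(w) > n for w in words):
--         return []
--     out = []
--     while words:
--         k = 1
--         while k < len(words) and len(" ".join(words[:k + 1])) <= n:
--             k += 1
--         out.append(" ".join(words[:k]))
--         words = words[k:]
--     return out
-- ===== Notes on version B (the rewrite author's own statement) =====
-- stated objective: alternative
-- what changed: B repeatedly extracts the longest word prefix whose space-join fits in n (an inner scan recomputing the joined length over list slices) and recurses on the remaining words, replacing A's single stateful fold with a mutable bucket index, trailing-space string accumulation and a final strip-and-filter cleanup pass.
import Mathlib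
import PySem

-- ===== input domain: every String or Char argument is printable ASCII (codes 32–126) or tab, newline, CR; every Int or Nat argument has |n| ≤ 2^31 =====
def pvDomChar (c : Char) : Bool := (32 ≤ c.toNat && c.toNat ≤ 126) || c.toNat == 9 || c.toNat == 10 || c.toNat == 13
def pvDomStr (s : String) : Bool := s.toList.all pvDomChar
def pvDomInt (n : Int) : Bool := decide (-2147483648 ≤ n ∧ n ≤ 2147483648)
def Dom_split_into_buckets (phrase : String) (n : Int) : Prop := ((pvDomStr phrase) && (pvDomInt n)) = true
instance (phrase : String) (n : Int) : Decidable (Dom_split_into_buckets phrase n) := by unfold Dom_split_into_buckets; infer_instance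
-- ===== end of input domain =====

-- B replaces A's single greedy fold (mutable bucket index, trailing-space strings, final
-- strip pass) by repeated longest-prefix extraction: take the longest word prefix whose
-- space-join fits in n, emit it joined, recurse on the remaining words (objective: alternative).

-- ===== PORT A =====
-- body of A's packing loop: result[c] += phrase + " "  /  c += 1; result.append(phrase + " ")
def pvAStep (n : Int) (st : List (List Char) × Int) (ph : List Char) : List (List Char) × Int :=
  let cur := (PySem.List.pyGet? st.1 st.2).getD []   -- result[c]; c is always in range in A
  if (ph.length : Int) + (cur.length : Int) ≤ n then
    (st.1.set st.2.toNat (cur ++ (ph ++ [' '])), st.2)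
  else
    (st.1 ++ [ph ++ [' ']], st.2 + 1)

-- body of A's cleanup loop: if i: if i[-1] == " ": final.append(i[:-1]) else final.append(i)
def pvCleanStep (final : List (List Char)) (i : List Char) : List (List Char) :=
  if i ≠ [] then
    if (PySem.List.pyGet? i (-1)).getD ' ' = ' ' then final ++ [PySem.List.slice i none (some (-1))]
    else final ++ [i]
  else final

def split_into_buckets (phrase : String) (n : Int) : List String :=
  let phrases := PySem.Chars.splitOn (PySem.Chars.replace phrase.toList [' '] ['|']) ['|']
  if phrases.any (fun i => decide (n < (i.length : Int))) then []   -- for i in phrases: if len(i) > n: return []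
  else
    let st := phrases.foldl (pvAStep n) ([[]], (0 : Int))
    (st.1.foldl pvCleanStep []).map String.mk

-- ===== PORT B =====
-- Source B inner while: k = 1; while k < len(words) and len(" ".join(words[:k+1])) <= n: k += 1
def pvFindK (n : Int) (words : List (List Char)) (k : Nat) : Nat :=
  if h : k < words.length ∧ ((PySem.Chars.join [' '] (words.take (k + 1))).length : Int) ≤ n
  then pvFindK n words (k + 1) else k
termination_by words.length - k

-- termination lemma for pvChunks (cited in its decreasing_by)
theorem pvFindK_ge (n : Int) (words : List (List Char)) (k : Nat) : k ≤ pvFindK n words k := by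
  unfold pvFindK
  split
  · exact Nat.le_trans (Nat.le_succ k) (pvFindK_ge n words (k + 1))
  · exact Nat.le_refl k
termination_by words.length - k

-- Source B outer while: emit " ".join(words[:k]); words = words[k:]
def pvChunks (n : Int) (words : List (List Char)) : List (List Char) :=
  match words with
  | [] => []
  | w :: ws =>
    let k := pvFindK n (w :: ws) 1
    PySem.Chars.join [' '] ((w :: ws).take k) :: pvChunks n ((w :: ws).drop k)
termination_by words.length
decreasing_by
  have h1 : 1 ≤ pvFindK n (w :: ws) 1 := pvFindK_ge n (w :: ws) 1
  simp
  omega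

def split_into_buckets_alt (phrase : String) (n : Int) : List String :=
  let words := PySem.Chars.splitOn (PySem.Chars.replace phrase.toList [' '] ['|']) ['|']
  if words.any (fun w => decide (n < (w.length : Int))) then []
  else (pvChunks n words).map String.mk

-- ===== PRECONDITION & SPEC =====
def Spec_split_into_buckets (phrase : String) (n : Int) (out : List String) : Prop := out = split_into_buckets_alt phrase n
instance (phrase : String) (n : Int) (out : List String) : Decidable (Spec_split_into_buckets phrase n out) := by unfold Spec_split_into_buckets; infer_instance

-- ===== CLAIM (what is proved, stated in full; the proofs are below) =====
def Claim_equal_split_into_buckets : Prop := ∀ (phrase : String) (n : Int), Dom_split_into_buckets phrase n → Spec_split_into_buckets phrase n (split_into_buckets phrase n)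

-- ===== LEMMAS AND PROOFS =====

-- the string A keeps for a bucket: the joined words followed by one trailing space
def pvG (b : List (List Char)) : List Char := PySem.Chars.join [' '] b ++ [' ']

-- proof-side reference greedy: the bucket lists A builds, as explicit word lists
def pvChunksB (n : Int) (b : List (List Char)) : List (List Char) → List (List (List Char))
  | [] => [b]
  | w :: ws =>
    if (w.length : Int) + ((PySem.Chars.join [' '] b).length : Int) + 1 ≤ n
    then pvChunksB n (b ++ [w]) ws
    else b :: pvChunksB n [w] ws

theorem pvJoin_concat (b : List (List Char)) (hb : b ≠ []) (w : List Char) :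
    PySem.Chars.join [' '] (b ++ [w]) = PySem.Chars.join [' '] b ++ ' ' :: w := by
  induction b with
  | nil => exact absurd rfl hb
  | cons x t ih =>
    cases t with
    | nil => simp [PySem.Chars.join_cons_cons, PySem.Chars.join_singleton]
    | cons y s =>
      rw [List.cons_append, List.cons_append, PySem.Chars.join_cons_cons, ← List.cons_append,
        ih (by simp), PySem.Chars.join_cons_cons]
      simp

theorem pvSet_concat {α : Type} (xs : List α) (y z : α) :
    (xs ++ [y]).set xs.length z = xs ++ [z] := by
  induction xs with
  | nil => rfl
  | cons a t ih => simp [ih]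

theorem pvGet_last_concat {α : Type} (xs : List α) (a : α) :
    PySem.List.pyGet? (xs ++ [a]) ((xs.length : Int)) = some a := by
  rw [PySem.List.pyGet?_natCast]
  simp

-- A's packing fold computes exactly the reference greedy's buckets (through pvG)
theorem pvLoop_inv (n : Int) (ws : List (List Char)) :
    ∀ (pre : List (List (List Char))) (b : List (List Char)), b ≠ [] →
    ws.foldl (pvAStep n) (pre.map pvG ++ [pvG b], (pre.length : Int))
      = ((pre ++ pvChunksB n b ws).map pvG, ((pre ++ pvChunksB n b ws).length : Int) - 1) := by
  induction ws with
  | nil =>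
    intro pre b hb
    simp [pvChunksB]
  | cons w ws ih =>
    intro pre b hb
    simp only [List.foldl_cons]
    have hget : (PySem.List.pyGet? (pre.map pvG ++ [pvG b]) ((pre.length : Int))).getD [] = pvG b := by
      have hc : ((pre.length : Nat) : Int) = (((pre.map pvG).length : Nat) : Int) := by simp
      rw [hc, pvGet_last_concat]
      rfl
    have hlen : ((pvG b).length : Int) = ((PySem.Chars.join [' '] b).length : Int) + 1 := by
      simp [pvG]
    by_cases hc : (w.length : Int) + ((PySem.Chars.join [' '] b).length : Int) + 1 ≤ n
    · have ha : pvAStep n (pre.map pvG ++ [pvG b], (pre.length : Int)) w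
          = (pre.map pvG ++ [pvG (b ++ [w])], (pre.length : Int)) := by
        simp only [pvAStep, hget, hlen]
        rw [if_pos (by omega)]
        have ht : ((pre.length : Int)).toNat = (pre.map pvG).length := by simp
        rw [ht, pvSet_concat]
        have : pvG b ++ (w ++ [' ']) = pvG (b ++ [w]) := by
          simp [pvG, pvJoin_concat b hb w]
        rw [this]
      rw [ha, ih pre (b ++ [w]) (by simp)]
      simp [pvChunksB, hc]
    · have ha : pvAStep n (pre.map pvG ++ [pvG b], (pre.length : Int)) w
          = ((pre ++ [b]).map pvG ++ [pvG [w]], ((pre ++ [b]).length : Int)) := by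
        simp only [pvAStep, hget, hlen]
        rw [if_neg (by omega)]
        simp [pvG, PySem.Chars.join_singleton]
      rw [ha, ih (pre ++ [b]) [w] (by simp)]
      simp [pvChunksB, hc]

theorem pvGet_neg_one_concat (xs : List Char) (a : Char) :
    PySem.List.pyGet? (xs ++ [a]) (-1) = some a := by
  simp [PySem.List.pyGet?, PySem.List.pyIdx?]

theorem pvSlice_drop_last (xs : List Char) (a : Char) :
    PySem.List.slice (xs ++ [a]) none (some (-1)) = xs := by
  simp [PySem.List.slice]

theorem pvClean (bs : List (List (List Char))) (acc : List (List Char)) :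
    (bs.map pvG).foldl pvCleanStep acc = acc ++ bs.map (fun b => PySem.Chars.join [' '] b) := by
  induction bs generalizing acc with
  | nil => simp
  | cons b t ih =>
    have hstep : pvCleanStep acc (pvG b) = acc ++ [PySem.Chars.join [' '] b] := by
      simp only [pvCleanStep, pvG]
      rw [if_pos (by simp), pvGet_neg_one_concat]
      simp [pvSlice_drop_last]
    simp only [List.map_cons, List.foldl_cons, hstep, ih]
    simp

-- the reference greedy on (cur.take k, cur.drop k) is what B's chunker produces
theorem pvChunksB_eq (n : Int) (cur : List (List Char)) (k : Nat) (hk1 : 1 ≤ k) (hk2 : k ≤ cur.length) :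
    (pvChunksB n (cur.take k) (cur.drop k)).map (PySem.Chars.join [' '])
      = PySem.Chars.join [' '] (cur.take (pvFindK n cur k)) :: pvChunks n (cur.drop (pvFindK n cur k)) := by
  rcases hd : cur.drop k with _ | ⟨w, ws⟩
  · have hkl : k = cur.length := by
      have := congrArg List.length hd
      simp at this
      omega
    have hkfix : pvFindK n cur k = k := by
      unfold pvFindK
      rw [dif_neg (by omega)]
    rw [hkfix, hd]
    simp [pvChunksB, pvChunks]
  · have hklt : k < cur.length := by
      have := congrArg List.length hd
      simp at this
      omega
    have hwk : cur[k]? = some w := by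
      have h2 := congrArg List.head? hd
      rwa [List.head?_drop] at h2
    have htake : cur.take (k + 1) = cur.take k ++ [w] := by
      rw [List.take_succ, hwk]
      rfl
    have hb_ne : cur.take k ≠ [] := by
      have : (cur.take k).length = k := List.length_take_of_le (by omega)
      intro h
      rw [h] at this
      simp at this
      omega
    have hjoin : PySem.Chars.join [' '] (cur.take (k + 1))
        = PySem.Chars.join [' '] (cur.take k) ++ ' ' :: w := by
      rw [htake, pvJoin_concat _ hb_ne]
    by_cases hc : (w.length : Int) + ((PySem.Chars.join [' '] (cur.take k)).length : Int) + 1 ≤ n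
    · have hcond : ((PySem.Chars.join [' '] (cur.take (k + 1))).length : Int) ≤ n := by
        rw [hjoin]
        simp only [List.length_append, List.length_cons]
        push_cast
        omega
      have hfk : pvFindK n cur k = pvFindK n cur (k + 1) := by
        conv_lhs => unfold pvFindK
        rw [dif_pos ⟨hklt, hcond⟩]
      simp only [pvChunksB, if_pos hc]
      have hdrop : cur.drop (k + 1) = ws := by
        have := congrArg (List.drop 1) hd
        simpa [List.drop_drop, Nat.add_comm] using this
      have hrec := pvChunksB_eq n cur (k + 1) (by omega) (by omega)
      rw [hdrop, htake] at hrec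
      rw [hfk, hrec]
    · have hcond : ¬ ((PySem.Chars.join [' '] (cur.take (k + 1))).length : Int) ≤ n := by
        rw [hjoin]
        simp only [List.length_append, List.length_cons]
        push_cast
        omega
      have hfk : pvFindK n cur k = k := by
        unfold pvFindK
        rw [dif_neg (by intro h; exact hcond h.2)]
      simp only [pvChunksB, if_neg hc, List.map_cons]
      rw [hfk, hd]
      congr 1
      have hrec := pvChunksB_eq n (w :: ws) 1 (by omega) (by simp)
      have ht1 : (w :: ws).take 1 = [w] := rfl
      have hd1 : (w :: ws).drop 1 = ws := rfl
      rw [ht1, hd1] at hrec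
      rw [hrec]
      conv_rhs => unfold pvChunks
  termination_by (cur.length, cur.length - k)
  decreasing_by
    all_goals have hl := congrArg List.length hd
    all_goals simp only [List.length_drop, List.length_cons] at hl
    all_goals first
      | (apply Prod.Lex.right; omega)
      | (apply Prod.Lex.left; simp only [List.length_cons]; omega)

-- ===== VERDICT (by name: the statement is the Claim_ definition above) =====
theorem split_into_buckets_spec : Claim_equal_split_into_buckets := by
  intro phrase n _
  unfold Spec_split_into_buckets
  simp only [split_into_buckets, split_into_buckets_alt]
  set phrases := PySem.Chars.splitOn (PySem.Chars.replace phrase.toList [' '] ['|']) ['|'] with hph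
  by_cases hany : phrases.any (fun i => decide (n < (i.length : Int))) = true
  · rw [if_pos hany, if_pos hany]
  · rw [if_neg hany, if_neg hany]
    cases hphr : phrases with
    | nil => simp [pvCleanStep, pvChunks]
    | cons w0 rest =>
      have hw0 : (w0.length : Int) ≤ n := by
        have hf : phrases.any (fun i => decide (n < (i.length : Int))) = false := Bool.eq_false_iff.mpr hany
        have := List.any_eq_false.mp hf w0 (by rw [hphr]; simp)
        simp at this
        omega
      have hfirst : pvAStep n ([[]], (0 : Int)) w0
          = (([] : List (List (List Char))).map pvG ++ [pvG [w0]], ((List.length ([] : List (List (List Char)))) : Int)) := by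
        simp only [pvAStep]
        rw [if_pos (by simp; omega)]
        simp [pvG, PySem.Chars.join_singleton, PySem.List.pyGet?, PySem.List.pyIdx?]
      have hinv := pvLoop_inv n rest [] [w0] (by simp)
      rw [List.foldl_cons, hfirst, hinv]
      simp only [List.nil_append]
      rw [pvClean]
      have hchunks := pvChunksB_eq n (w0 :: rest) 1 (by omega) (by simp)
      have ht1 : (w0 :: rest).take 1 = [w0] := rfl
      have hd1 : (w0 :: rest).drop 1 = rest := rfl
      rw [ht1, hd1] at hchunks
      have hB : pvChunks n (w0 :: rest)
          = PySem.Chars.join [' '] ((w0 :: rest).take (pvFindK n (w0 :: rest) 1))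
            :: pvChunks n ((w0 :: rest).drop (pvFindK n (w0 :: rest) 1)) := by
        conv_lhs => unfold pvChunks
      rw [hB, ← hchunks]
      simp
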